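-- pv_equiv track=rewrite | github.com/Hallowoods/High-precision-Fidelity-Estimation-with-Common-Randomized-measurements | codes/PauliCRMTFIM_EDGS.py | generate_commuting_Pj
-- ===== SOURCE A (Python) =====
-- from itertools import product
--
-- def generate_commuting_Pj(Pi_labels):
--     n = len(Pi_labels)
--     options = []
--     for i in range(n):
--         if Pi_labels[i] == 'I':
--             options.append(['I','X','Y','Z'])
--         else:
--             options.append([Pi_labels[i], 'I'])
--     all_candidates = [list(lbl) for lbl in product(*options)]
--     return [lbl for lbl in all_candidates if any(l != 'I' for l in lbl)]
-- ===== SOURCE B (Python) =====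
-- def generate_commuting_Pj(Pi_labels):
--     # DFS over positions with a running "nontrivial" flag: no options table,
--     # no itertools.product, no post-filter.
--     n = len(Pi_labels)
--     out = []
--     def dfs(i, prefix, nontrivial):
--         if i == n:
--             if nontrivial:
--                 out.append(prefix.copy())
--             return
--         choices = ['I', 'X', 'Y', 'Z'] if Pi_labels[i] == 'I' else [Pi_labels[i], 'I']
--         for c in choices:
--             prefix.append(c)
--             dfs(i + 1, prefix, nontrivial or c != 'I')
--             prefix.pop()
--     dfs(0, [], False)
--     return out
-- ===== Notes on version B (the rewrite author's own statement) =====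
-- stated objective: alternative
-- what changed: Replaced the options-table + itertools.product + post-filter pipeline by a single recursive DFS over positions that carries the current prefix and a 'nontrivial' flag, emitting each commuting label directly and never generating the all-'I' tuple.
import Mathlib
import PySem

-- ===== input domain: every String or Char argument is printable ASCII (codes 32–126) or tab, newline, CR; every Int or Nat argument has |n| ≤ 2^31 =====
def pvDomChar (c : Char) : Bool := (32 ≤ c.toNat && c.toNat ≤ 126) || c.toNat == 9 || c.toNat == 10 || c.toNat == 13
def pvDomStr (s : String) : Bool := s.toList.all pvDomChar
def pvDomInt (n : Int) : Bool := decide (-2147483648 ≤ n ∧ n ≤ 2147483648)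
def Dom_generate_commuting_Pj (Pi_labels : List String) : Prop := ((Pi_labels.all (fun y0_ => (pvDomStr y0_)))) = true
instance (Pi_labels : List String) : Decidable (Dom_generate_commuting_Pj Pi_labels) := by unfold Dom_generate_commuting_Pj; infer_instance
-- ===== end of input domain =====

-- B replaces the options-table + itertools.product + post-filter pipeline of A by a
-- single prefix-accumulator DFS carrying a "nontrivial" flag, so the all-'I' tuple is
-- never emitted and no filtering pass is needed (objective: alternative).


-- ===== PORT A =====
-- itertools.product(*options) over a list of option lists (first factor varies slowest)
def pvProduct : List (List String) → List (List String)
  | [] => [[]]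
  | o :: rest => o.flatMap (fun c => (pvProduct rest).map (fun t => c :: t))

def generate_commuting_Pj (Pi_labels : List String) : List (List String) :=
  let options := Pi_labels.map (fun l => if l == "I" then ["I", "X", "Y", "Z"] else [l, "I"])
  let all_candidates := pvProduct options
  all_candidates.filter (fun lbl => lbl.any (fun l => l != "I"))

-- ===== PORT B =====
def pvChoices (l : String) : List String :=
  if l == "I" then ["I", "X", "Y", "Z"] else [l, "I"]

def pvDfs : List String → List String → Bool → List (List String) → List (List String)
  | [], pre, nontrivial, out => if nontrivial then out ++ [pre] else out
  | l :: rest, pre, nontrivial, out =>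
      (pvChoices l).foldl
        (fun acc c => pvDfs rest (pre ++ [c]) (nontrivial || (c != "I")) acc) out

def generate_commuting_Pj_alt (Pi_labels : List String) : List (List String) :=
  pvDfs Pi_labels [] false []

-- ===== PRECONDITION & SPEC =====
def Spec_generate_commuting_Pj (Pi_labels : List String) (out : List (List String)) : Prop := out = generate_commuting_Pj_alt Pi_labels
instance (Pi_labels : List String) (out : List (List String)) : Decidable (Spec_generate_commuting_Pj Pi_labels out) := by unfold Spec_generate_commuting_Pj; infer_instance

-- ===== CLAIM (what is proved, stated in full; the proofs are below) =====
def Claim_equal_generate_commuting_Pj : Prop := ∀ (Pi_labels : List String), Dom_generate_commuting_Pj Pi_labels → Spec_generate_commuting_Pj Pi_labels (generate_commuting_Pj Pi_labels)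

-- ===== LEMMAS AND PROOFS =====

theorem pvDfs_spec (ls : List String) :
    ∀ (pre : List String) (nt : Bool) (out : List (List String)),
      pvDfs ls pre nt out =
        out ++ ((pvProduct (ls.map pvChoices)).filter
                  (fun t => nt || t.any (fun l => l != "I"))).map (fun t => pre ++ t) := by
  induction ls with
  | nil =>
      intro pre nt out
      cases nt <;> simp [pvDfs, pvProduct]
  | cons l rest ih =>
      intro pre nt out
      have haux : ∀ (cs : List String) (out : List (List String)),
          cs.foldl (fun acc c => pvDfs rest (pre ++ [c]) (nt || (c != "I")) acc) out =
            out ++ cs.flatMap (fun c =>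
              ((pvProduct (rest.map pvChoices)).filter
                 (fun t => (nt || (c != "I")) || t.any (fun l => l != "I"))).map
                (fun t => (pre ++ [c]) ++ t)) := by
        intro cs
        induction cs with
        | nil => intro out; simp
        | cons c cs ihc =>
            intro out
            rw [List.foldl_cons, ihc, ih]
            simp [List.append_assoc]
      show (pvChoices l).foldl
            (fun acc c => pvDfs rest (pre ++ [c]) (nt || (c != "I")) acc) out = _
      rw [haux]
      congr 1
      simp only [List.map_cons, pvProduct, List.filter_flatMap, List.map_flatMap]
      congr 1
      funext c
      rw [List.filter_map, List.map_map]
      congr 1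
      · funext t
        simp
      · refine List.filter_congr ?_
        intro t _
        simp [Function.comp, Bool.or_assoc]

-- ===== VERDICT (by name: the statement is the Claim_ definition above) =====
theorem generate_commuting_Pj_spec : Claim_equal_generate_commuting_Pj := by
  intro Pi_labels _
  unfold Spec_generate_commuting_Pj generate_commuting_Pj generate_commuting_Pj_alt
  have h : (fun l => if l == "I" then ["I", "X", "Y", "Z"] else [l, "I"]) = pvChoices := rfl
  rw [pvDfs_spec, h]
  simp
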